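-- pv_equiv track=rewrite | github.com/sonyashkapa/Sonya-Shkapa | newtokenizer.py | making_array
-- ===== SOURCE A (Python) =====
-- def making_array(str):
--     """ This function divides a string in a list of alphabetical substrings."""
--
--     i = 0
--     # set the array, in which each element will be the alphabetical chain
--     data = []
--     if str == '':
--         return []
--     # loop that goes through each character in a string
--     for i, c in enumerate(str):
--         # checking if the character is an alphabetical char
--         if str[i].isalpha():
--             # if the character is an alphabetical char
--             # then we check it's index and the previous element
--             if (i > 0) and (str[i-1].isalpha()):
--                 continue
--             else:
--                 #  we remember the index of the first char in the alphabetical chain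
--                 nomer1 = i
--         else:
--             # if the character is not char, we check it's index and the previous character
--             if (i > 0) and (str[i-1].isalpha()):
--                 # if it's the last char in the alphabetical chain
--                 # then we add this chain to the array
--                 data.append(str[nomer1:i])
--     # checking the last character in our string, whether it is letter or not
--     # if the last character was alphabetic
--     # then the cycle does not meet non-alphabetic one to save the last alphabetic chain
--     if str[i].isalpha():
--         data.append(str[nomer1:i+1])
--     return(data)
-- ===== SOURCE B (Python) =====
-- def making_array(str):
--     """Divide a string into its maximal runs of alphabetical characters."""
--     runs = []
--     cur = ''
--     for c in str:
--         if c.isalpha():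
--             cur += c
--         else:
--             if cur:
--                 runs.append(cur)
--             cur = ''
--     if cur:
--         runs.append(cur)
--     return runs
-- ===== Notes on version B (the rewrite author's own statement) =====
-- stated objective: simpler
-- what changed: A detects run boundaries by indexing (enumerate, str[i-1] lookback, remembered start index, slicing, and a post-loop check on the leaked loop variable); B is a single pass that accumulates the current alphabetical run in a string and flushes it at each non-alphabetical character and at the end.
import Mathlib
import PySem

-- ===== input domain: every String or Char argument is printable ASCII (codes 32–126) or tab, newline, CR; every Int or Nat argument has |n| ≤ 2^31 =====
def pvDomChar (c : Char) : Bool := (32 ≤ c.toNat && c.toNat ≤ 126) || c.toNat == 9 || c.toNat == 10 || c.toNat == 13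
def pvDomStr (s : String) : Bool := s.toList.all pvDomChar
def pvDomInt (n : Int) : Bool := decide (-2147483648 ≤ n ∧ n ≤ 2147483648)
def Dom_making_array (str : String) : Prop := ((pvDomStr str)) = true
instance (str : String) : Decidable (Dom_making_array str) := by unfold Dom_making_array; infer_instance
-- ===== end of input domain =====

-- B replaces A's index/lookback/slice transition detection by a single pass that
-- accumulates the current alphabetical run directly (objective: simpler).

-- ===== PORT A =====
def making_array (str : String) : List String :=
  let cs := str.toList
  if cs = [] then []
  else
    let st := (PySem.List.enumerate cs 0).foldl (fun (acc : Int × List String) ic =>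
      let i := ic.1
      let nomer1 := acc.1
      let data := acc.2
      if PySem.Chars.isalpha (PySem.List.pyGetD cs i ' ') = true then
        if 0 < i ∧ PySem.Chars.isalpha (PySem.List.pyGetD cs (i - 1) ' ') = true then
          (nomer1, data)       -- continue
        else
          (i, data)            -- nomer1 = i
      else
        if 0 < i ∧ PySem.Chars.isalpha (PySem.List.pyGetD cs (i - 1) ' ') = true then
          (nomer1, data ++ [String.ofList (PySem.List.slice cs (some nomer1) (some i))])
        else
          (nomer1, data)) (0, [])
    -- the loop variable i leaks out of the for-loop: here i = len(str) - 1 (str is nonempty)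
    let i : Int := (cs.length : Int) - 1
    if PySem.Chars.isalpha (PySem.List.pyGetD cs i ' ') = true then
      st.2 ++ [String.ofList (PySem.List.slice cs (some st.1) (some (i + 1)))]
    else
      st.2

-- ===== PORT B =====
def making_array_alt (str : String) : List String :=
  let st := str.toList.foldl (fun (acc : List String × List Char) c =>
      if PySem.Chars.isalpha c = true then (acc.1, acc.2 ++ [c])
      else if acc.2 ≠ [] then (acc.1 ++ [String.ofList acc.2], [])
      else (acc.1, [])) ([], [])
  if st.2 ≠ [] then st.1 ++ [String.ofList st.2] else st.1

-- ===== PRECONDITION & SPEC =====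
def Spec_making_array (str : String) (out : List String) : Prop := out = making_array_alt str
instance (str : String) (out : List String) : Decidable (Spec_making_array str out) := by unfold Spec_making_array; infer_instance

-- ===== CLAIM (what is proved, stated in full; the proofs are below) =====
def Claim_equal_making_array : Prop := ∀ (str : String), Dom_making_array str → Spec_making_array str (making_array str)

-- ===== LEMMAS AND PROOFS =====

/-- The common specification: the maximal alphabetical runs of `rest`, with `cur`
the (possibly empty) run in progress. -/
def pvRuns : List Char → List Char → List String
  | [], cur => if cur = [] then [] else [String.ofList cur]
  | c :: rest, cur =>
    if PySem.Chars.isalpha c = true then pvRuns rest (cur ++ [c])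
    else if cur = [] then pvRuns rest []
    else String.ofList cur :: pvRuns rest []

/-- A's loop body, as in the port. -/
def pvStepA (cs : List Char) (acc : Int × List String) (ic : Int × Char) : Int × List String :=
  let i := ic.1
  let nomer1 := acc.1
  let data := acc.2
  if PySem.Chars.isalpha (PySem.List.pyGetD cs i ' ') = true then
    if 0 < i ∧ PySem.Chars.isalpha (PySem.List.pyGetD cs (i - 1) ' ') = true then
      (nomer1, data)
    else
      (i, data)
  else
    if 0 < i ∧ PySem.Chars.isalpha (PySem.List.pyGetD cs (i - 1) ' ') = true then
      (nomer1, data ++ [String.ofList (PySem.List.slice cs (some nomer1) (some i))])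
    else
      (nomer1, data)

/-- A's trailing-run check, as in the port. -/
def pvFinalA (cs : List Char) (st : Int × List String) : List String :=
  let i : Int := (cs.length : Int) - 1
  if PySem.Chars.isalpha (PySem.List.pyGetD cs i ' ') = true then
    st.2 ++ [String.ofList (PySem.List.slice cs (some st.1) (some (i + 1)))]
  else
    st.2

/-- B's loop body, as in the port. -/
def pvStepB (acc : List String × List Char) (c : Char) : List String × List Char :=
  if PySem.Chars.isalpha c = true then (acc.1, acc.2 ++ [c])
  else if acc.2 ≠ [] then (acc.1 ++ [String.ofList acc.2], [])
  else (acc.1, [])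

lemma making_array_eq (str : String) :
    making_array str =
      if str.toList = [] then []
      else pvFinalA str.toList
        ((PySem.List.enumerate str.toList 0).foldl (pvStepA str.toList) (0, [])) := rfl

lemma making_array_alt_eq (str : String) :
    making_array_alt str =
      (fun st => if st.2 ≠ [] then st.1 ++ [String.ofList st.2] else st.1)
        (str.toList.foldl pvStepB ([], [])) := rfl

lemma pvB_loop (l : List Char) (rs : List String) (cur : List Char) :
    (fun st => if st.2 ≠ [] then st.1 ++ [String.ofList st.2] else st.1)
        (l.foldl pvStepB (rs, cur)) = rs ++ pvRuns l cur := by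
  induction l generalizing rs cur with
  | nil =>
    simp only [List.foldl_nil, pvRuns]
    by_cases h : cur = [] <;> simp [h]
  | cons c rest ih =>
    rw [List.foldl_cons]
    by_cases ha : PySem.Chars.isalpha c = true
    · rw [show pvStepB (rs, cur) c = (rs, cur ++ [c]) by simp [pvStepB, ha]]
      rw [ih rs (cur ++ [c])]
      simp [pvRuns, ha]
    · by_cases hc : cur = []
      · rw [show pvStepB (rs, cur) c = (rs, []) by simp [pvStepB, ha, hc]]
        rw [ih rs []]
        simp [pvRuns, ha, hc]
      · rw [show pvStepB (rs, cur) c = (rs ++ [String.ofList cur], []) by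
          simp [pvStepB, ha, hc]]
        rw [ih (rs ++ [String.ofList cur]) []]
        simp [pvRuns, ha, hc]

lemma pv_getD_mid (pre rest : List Char) (c d : Char) :
    (pre ++ c :: rest).getD pre.length d = c := by
  simp [List.getD_eq_getElem?_getD]

lemma pv_getD_last (pre suf : List Char) (d : Char) (h : pre ≠ []) :
    (pre ++ suf).getD (pre.length - 1) d = pre.getLastD d := by
  have hlen : pre.length - 1 < pre.length := by
    cases pre with
    | nil => exact absurd rfl h
    | cons a l => simp
  rw [List.getD_eq_getElem?_getD, List.getElem?_append_left hlen,
    ← List.getLast?_eq_getElem?, List.getLastD_eq_getLast?]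

/-- `str[pre.length - 1]` (as A reads it) is the last character of `pre`. -/
lemma pv_prev (pre suf : List Char) (h : pre ≠ []) :
    PySem.List.pyGetD (pre ++ suf) ((pre.length : Int) - 1) ' ' = pre.getLastD ' ' := by
  have h1 : 1 ≤ pre.length := Nat.one_le_iff_ne_zero.mpr (by simpa using h)
  rw [show ((pre.length : Int) - 1) = ((pre.length - 1 : Nat) : Int) by omega,
    PySem.List.pyGetD_natCast, pv_getD_last pre suf ' ' h]

/-- The slice `str[n : pre.length]` is exactly `pre.drop n`. -/
lemma pv_slice_drop (pre suf : List Char) (n : Nat) (hn : n ≤ pre.length) :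
    PySem.List.slice (pre ++ suf) (some (n : Int)) (some (pre.length : Int)) = pre.drop n := by
  rw [PySem.List.slice_toNat _ (Int.natCast_nonneg n) (Int.natCast_nonneg pre.length)]
  simp only [Int.toNat_natCast]
  rw [List.drop_append_of_le_length hn]
  have hlen : (pre.drop n).length = pre.length - n := by simp
  rw [show pre.length - n = (pre.drop n).length from hlen.symm, List.take_left]

/-- Invariant proof for A's loop: folding `pvStepA` over the remaining enumerated
suffix and then applying the trailing check yields `data ++ pvRuns suf cur`. -/
lemma pvA_loop (suf : List Char) : ∀ (pre : List Char) (nomer1 : Int) (data : List String)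
    (cur : List Char),
    ((cur = [] ∧ (pre = [] ∨ PySem.Chars.isalpha (pre.getLastD ' ') = false))
      ∨ (∃ n : Nat, nomer1 = (n : Int) ∧ n ≤ pre.length ∧ pre ≠ [] ∧
          PySem.Chars.isalpha (pre.getLastD ' ') = true ∧ cur = pre.drop n ∧ cur ≠ [])) →
    pvFinalA (pre ++ suf)
      ((PySem.List.enumerate suf (pre.length : Int)).foldl (pvStepA (pre ++ suf)) (nomer1, data))
      = data ++ pvRuns suf cur := by
  induction suf with
  | nil =>
    intro pre nomer1 data cur hinv
    rw [PySem.List.enumerate_nil, List.foldl_nil, List.append_nil]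
    rcases hinv with ⟨hcur, hpre⟩ | ⟨n, hn, hle, hne, hal, hcur, hcne⟩
    · subst hcur
      by_cases hp : pre = []
      · subst hp
        rw [pvFinalA, pvRuns]
        rw [if_neg (by decide)]
        simp
      · have hlast : PySem.List.pyGetD pre ((pre.length : Int) - 1) ' ' = pre.getLastD ' ' := by
          simpa using pv_prev pre [] hp
        have hflast : PySem.Chars.isalpha (pre.getLastD ' ') = false := by
          rcases hpre with h | h
          · exact absurd h hp
          · exact h
        rw [pvFinalA, pvRuns]
        rw [hlast, hflast]
        simp
    · subst hn hcur
      have hlast : PySem.List.pyGetD pre ((pre.length : Int) - 1) ' ' = pre.getLastD ' ' := by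
        simpa using pv_prev pre [] hne
      rw [pvFinalA, pvRuns]
      rw [hlast, if_pos hal]
      rw [show (((pre.length : Int) - 1) + 1) = (pre.length : Int) by ring]
      rw [show PySem.List.slice pre (some (n : Int)) (some (pre.length : Int)) = pre.drop n from
        by simpa using pv_slice_drop pre [] n hle]
      simp [hcne]
  | cons c rest ih =>
    intro pre nomer1 data cur hinv
    rw [PySem.List.enumerate_cons, List.foldl_cons]
    have hmid : PySem.List.pyGetD (pre ++ c :: rest) (pre.length : Int) ' ' = c := by
      rw [PySem.List.pyGetD_natCast, pv_getD_mid]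
    have hassoc : pre ++ c :: rest = (pre ++ [c]) ++ rest := by simp
    have hlen' : ((pre ++ [c]).length : Int) = (pre.length : Int) + 1 := by simp
    rcases hinv with ⟨hcur, hpre⟩ | ⟨n, hn, hle, hne, hal, hcur, hcne⟩
    · -- outside a run
      subst hcur
      have hcond : ¬ (0 < (pre.length : Int) ∧
          PySem.Chars.isalpha
            (PySem.List.pyGetD (pre ++ c :: rest) ((pre.length : Int) - 1) ' ') = true) := by
        rintro ⟨hpos, halp⟩
        have hpne : pre ≠ [] := by
          intro h
          rw [h] at hpos
          simp at hpos
        rw [pv_prev pre (c :: rest) hpne] at halp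
        rcases hpre with h | h
        · exact hpne h
        · rw [h] at halp
          exact absurd halp (by simp)
      by_cases hac : PySem.Chars.isalpha c = true
      · rw [show pvStepA (pre ++ c :: rest) (nomer1, data) ((pre.length : Int), c)
            = ((pre.length : Int), data) by
          simp only [pvStepA, hmid]
          rw [if_pos hac, if_neg hcond]]
        rw [hassoc, ← hlen']
        rw [ih (pre ++ [c]) ((pre.length : Nat) : Int) data [c]
          (Or.inr ⟨pre.length, rfl, by simp, by simp, by simp [hac], by simp, by simp⟩)]
        simp [pvRuns, hac]
      · rw [show pvStepA (pre ++ c :: rest) (nomer1, data) ((pre.length : Int), c)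
            = (nomer1, data) by
          simp only [pvStepA, hmid]
          rw [if_neg (by simp [hac]), if_neg hcond]]
        rw [hassoc, ← hlen']
        rw [ih (pre ++ [c]) nomer1 data []
          (Or.inl ⟨rfl, Or.inr (by simp [hac])⟩)]
        simp [pvRuns, hac]
    · -- inside a run: cur = pre.drop n ≠ []
      subst hn hcur
      have hcond : (0 < (pre.length : Int) ∧
          PySem.Chars.isalpha
            (PySem.List.pyGetD (pre ++ c :: rest) ((pre.length : Int) - 1) ' ') = true) := by
        refine ⟨?_, by rw [pv_prev pre (c :: rest) hne]; exact hal⟩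
        have : 1 ≤ pre.length := Nat.one_le_iff_ne_zero.mpr (by simpa using hne)
        omega
      by_cases hac : PySem.Chars.isalpha c = true
      · rw [show pvStepA (pre ++ c :: rest) ((n : Int), data) ((pre.length : Int), c)
            = ((n : Int), data) by
          simp only [pvStepA, hmid]
          rw [if_pos hac, if_pos hcond]]
        rw [hassoc, ← hlen']
        rw [ih (pre ++ [c]) (n : Int) data (pre.drop n ++ [c])
          (Or.inr ⟨n, rfl, by simp; omega, by simp, by simp [hac],
            (List.drop_append_of_le_length hle).symm, by simp⟩)]
        simp [pvRuns, hac]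
      · rw [show pvStepA (pre ++ c :: rest) ((n : Int), data) ((pre.length : Int), c)
            = ((n : Int), data ++ [String.ofList (pre.drop n)]) by
          simp only [pvStepA, hmid]
          rw [if_neg (by simp [hac]), if_pos hcond, pv_slice_drop pre (c :: rest) n hle]]
        rw [hassoc, ← hlen']
        rw [ih (pre ++ [c]) (n : Int) (data ++ [String.ofList (pre.drop n)]) []
          (Or.inl ⟨rfl, Or.inr (by simp [hac])⟩)]
        simp [pvRuns, hac, hcne]

-- ===== VERDICT (by name: the statement is the Claim_ definition above) =====
theorem making_array_spec : Claim_equal_making_array := by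
  intro str _
  unfold Spec_making_array
  rw [making_array_eq, making_array_alt_eq]
  rw [pvB_loop str.toList [] []]
  by_cases h : str.toList = []
  · rw [if_pos h, h]
    simp [pvRuns]
  · rw [if_neg h]
    have := pvA_loop str.toList [] 0 [] [] (Or.inl ⟨rfl, Or.inl rfl⟩)
    simpa using this
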